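-- pv_equiv track=rewrite | github.com/PurpleSensation/PeekPy | PeekPy/peekPy.py | _compute_indent_levels
-- ===== SOURCE A (Python) =====
-- def _compute_indent_levels(raw_lines, indent_size=4):
--     """
--     Return a list with the logical indent *level* of every line.
--     Blank lines get ``None`` so we can reproduce them verbatim.
--     Tabs are **already** expanded when this is called.
--     """
--     stack = []              # holds the distinct “column numbers” we meet
--     levels = []
--
--     for line in raw_lines:
--         stripped = line.lstrip()
--         if not stripped:        # empty / whitespace-only
--             levels.append(None)
--             continue
--
--         col = len(line) - len(stripped)
--
--         # climb back if current indent shrank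
--         while stack and col < stack[-1]:
--             stack.pop()
--
--         # new deeper block → push
--         if not stack or col > stack[-1]:
--             stack.append(col)
--
--         levels.append(len(stack) - 1)   # depth = stack length – root(0)
--
--     return levels
-- ===== SOURCE B (Python) =====
-- def _bisect_left(a, x):
--     lo, hi = 0, len(a)
--     while lo < hi:
--         mid = (lo + hi) // 2
--         if a[mid] < x:
--             lo = mid + 1
--         else:
--             hi = mid
--     return lo
--
--
-- def _compute_indent_levels(raw_lines, indent_size=4):
--     stack = []
--     levels = []
--     for line in raw_lines:
--         stripped = line.lstrip()
--         if not stripped: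
--             levels.append(None)
--             continue
--         col = len(line) - len(stripped)
--         # stack is always strictly increasing, so the climb-and-push of the
--         # original is a single binary-search position: truncate and re-push.
--         idx = _bisect_left(stack, col)
--         del stack[idx:]
--         stack.append(col)
--         levels.append(idx)
--     return levels
-- ===== Notes on version B (the rewrite author's own statement) =====
-- stated objective: idiomatic
-- what changed: The inner while-pop-then-push climb over the stack is replaced by a single binary-search (bisect_left) position on the strictly increasing stack, followed by truncate-and-push; the depth is the search index itself instead of the resulting stack length minus one.
import Mathlib
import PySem

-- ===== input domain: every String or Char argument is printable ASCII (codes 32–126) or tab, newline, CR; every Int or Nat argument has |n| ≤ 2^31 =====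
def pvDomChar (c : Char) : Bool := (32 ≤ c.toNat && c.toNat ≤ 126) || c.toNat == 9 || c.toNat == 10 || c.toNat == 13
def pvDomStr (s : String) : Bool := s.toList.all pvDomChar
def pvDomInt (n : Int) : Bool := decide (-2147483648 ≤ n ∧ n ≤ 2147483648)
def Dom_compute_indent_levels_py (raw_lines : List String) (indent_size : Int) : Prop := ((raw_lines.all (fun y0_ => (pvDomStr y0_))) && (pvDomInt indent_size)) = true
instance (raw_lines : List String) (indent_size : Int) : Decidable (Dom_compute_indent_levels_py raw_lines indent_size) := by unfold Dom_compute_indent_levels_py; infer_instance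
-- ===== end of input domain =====

-- B replaces A's inner while-pop-then-push climb by a single binary-search
-- position on the strictly increasing stack (idiomatic bisect_left form).

-- ===== PORT A =====
-- 'while stack and col < stack[-1]: stack.pop()'
def pyClimb (stack : List Int) (col : Int) : List Int :=
  match h : stack.getLast? with
  | some t => if col < t then pyClimb stack.dropLast col else stack
  | none => stack
termination_by stack.length
decreasing_by
  have hne : stack ≠ [] := by intro e; rw [e] at h; simp at h
  have := List.length_pos_iff.mpr hne
  simp [List.length_dropLast]; omega

-- one iteration of A's 'for line in raw_lines' loop, state = (stack, levels)
def pyStepA (st : List Int × List (Option Int)) (line : String) : List Int × List (Option Int) :=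
  let stripped := PySem.Str.lstrip line
  if stripped.toList = [] then (st.1, st.2 ++ [none])
  else
    let col := PySem.Str.len line - PySem.Str.len stripped
    let stack := pyClimb st.1 col
    let stack :=
      match stack.getLast? with
      | none => stack ++ [col]
      | some t => if t < col then stack ++ [col] else stack
    (stack, st.2 ++ [some (PySem.List.len stack - 1)])

def compute_indent_levels_py (raw_lines : List String) (indent_size : Int) : List (Option Int) :=
  (List.foldl pyStepA ([], []) raw_lines).2

-- ===== PORT B =====
-- Source B's hand-written _bisect_left, step for step
def bsearchLeft (a : List Int) (x : Int) (lo hi : Nat) : Nat :=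
  if lo < hi then
    let mid := (lo + hi) / 2
    if PySem.List.pyGetD a (mid : Int) 0 < x then bsearchLeft a x (mid + 1) hi
    else bsearchLeft a x lo mid
  else lo
termination_by hi - lo
decreasing_by all_goals omega

-- one iteration of Source B's loop, state = (stack, levels)
def pyStepB (st : List Int × List (Option Int)) (line : String) : List Int × List (Option Int) :=
  let stripped := PySem.Str.lstrip line
  if stripped.toList = [] then (st.1, st.2 ++ [none])
  else
    let col := PySem.Str.len line - PySem.Str.len stripped
    let idx := bsearchLeft st.1 col 0 st.1.length
    (st.1.take idx ++ [col], st.2 ++ [some (idx : Int)])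

def compute_indent_levels_py_alt (raw_lines : List String) (indent_size : Int) : List (Option Int) :=
  (List.foldl pyStepB ([], []) raw_lines).2

-- ===== PRECONDITION & SPEC =====
def Spec_compute_indent_levels_py (raw_lines : List String) (indent_size : Int) (out : List (Option Int)) : Prop := out = compute_indent_levels_py_alt raw_lines indent_size
instance (raw_lines : List String) (indent_size : Int) (out : List (Option Int)) : Decidable (Spec_compute_indent_levels_py raw_lines indent_size out) := by unfold Spec_compute_indent_levels_py; infer_instance

-- ===== CLAIM (what is proved, stated in full; the proofs are below) =====
def Claim_equal_compute_indent_levels_py : Prop := ∀ (raw_lines : List String) (indent_size : Int), Dom_compute_indent_levels_py raw_lines indent_size → Spec_compute_indent_levels_py raw_lines indent_size (compute_indent_levels_py raw_lines indent_size)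

-- ===== LEMMAS AND PROOFS =====

-- Source B's binary search computes bisect_left
lemma bsearchLeft_eq_loop (a : List Int) (x : Int) : ∀ (fuel lo hi : Nat), hi ≤ a.length → hi - lo ≤ fuel →
    bsearchLeft a x lo hi = PySem.List.bisectLeftLoop a x fuel lo hi := by
  intro fuel
  induction fuel with
  | zero =>
    intro lo hi hlen hf
    rw [bsearchLeft]
    have : ¬ lo < hi := by omega
    simp [this, PySem.List.bisectLeftLoop]
  | succ n ih =>
    intro lo hi hlen hf
    rw [bsearchLeft]
    by_cases hlt : lo < hi
    · have hmid : (lo + hi) / 2 < a.length := by omega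
      have hget : a[(lo + hi) / 2]? = some a[(lo + hi) / 2] := List.getElem?_eq_getElem hmid
      simp only [PySem.List.bisectLeftLoop, hlt, if_pos, PySem.List.pyGetD_natCast,
        List.getD_eq_getElem?_getD, hget, Option.getD_some]
      split
      · exact ih _ _ hlen (by omega)
      · exact ih _ _ (by omega) (by omega)
    · simp [hlt, PySem.List.bisectLeftLoop]

lemma bsearchLeft_eq_bisectLeft (a : List Int) (x : Int) :
    bsearchLeft a x 0 a.length = PySem.List.bisectLeft a x := by
  rw [PySem.List.bisectLeft, bsearchLeft_eq_loop a x a.length 0 a.length le_rfl (by omega)]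

lemma takeWhile_eq_take_of (p : Int → Bool) (l : List Int) : ∀ (m : Nat), m ≤ l.length →
    (∀ j (hj : j < l.length), j < m → p l[j]) → (∀ (hm : m < l.length), p l[m] = false) →
    l.takeWhile p = l.take m := by
  induction l with
  | nil => simp
  | cons a t ih =>
    intro m hm h1 h2
    cases m with
    | zero =>
      have := h2 (by simp)
      simp at this
      simp [this]
    | succ k =>
      have hpa : p a := h1 0 (by simp) (by omega)
      simp only [List.takeWhile_cons, hpa, if_pos, List.take_succ_cons]
      congr 1
      exact ih k (by simpa using hm) (fun j hj hjk => h1 (j+1) (by simpa using hj) (by omega))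
        (fun hk => h2 (by simpa using hk))

-- A's climb loop on a strictly increasing stack keeps exactly the prefix ≤ col
lemma pyClimb_eq_takeWhile (stack : List Int) (col : Int) (hs : stack.Pairwise (· < ·)) :
    pyClimb stack col = stack.takeWhile (fun a => a ≤ col) := by
  induction stack using List.reverseRecOn with
  | nil => rw [pyClimb]; rfl
  | append_singleton l t ih =>
    rw [pyClimb]
    split
    · next t' h =>
      have ht : t = t' := by simpa [List.getLast?_concat] using h
      subst ht
      by_cases hlt : col < t
      · rw [if_pos hlt, List.dropLast_concat, ih (List.pairwise_append.mp hs).1,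
          List.takeWhile_append]
        split
        · next htw =>
          have hl : List.takeWhile (fun a => decide (a ≤ col)) l = l :=
            (List.takeWhile_sublist _).eq_of_length htw
          simp only [show ¬ (t ≤ col) by omega, List.takeWhile_cons, decide_eq_true_eq,
            ite_false, List.takeWhile_nil, List.append_nil]
          exact hl
        · rfl
      · rw [if_neg hlt]
        have hall : ∀ x ∈ l ++ [t], (fun a => decide (a ≤ col)) x = true := by
          intro x hx
          rcases List.mem_append.mp hx with hx | hx
          · have := (List.pairwise_append.mp hs).2.2 x hx t (by simp)
            simp; omega
          · simp at hx; simp [hx]; omega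
        exact ((List.takeWhile_eq_self_iff).mpr hall).symm
    · next h => simp at h

lemma pairwise_take_append (stack : List Int) (col : Int) (i : Nat)
    (hs : stack.Pairwise (· < ·)) (hi : i ≤ stack.length)
    (hlt : ∀ j (hj : j < stack.length), j < i → stack[j] < col) :
    (stack.take i ++ [col]).Pairwise (· < ·) := by
  refine List.pairwise_append.mpr ⟨hs.sublist (List.take_sublist i stack), by simp, ?_⟩
  intro a ha b hb
  simp at hb; subst hb
  obtain ⟨j, hj, rfl⟩ := List.mem_iff_getElem.mp ha
  rw [List.getElem_take]
  exact hlt j (by simp at hj; omega) (by simp at hj; omega)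

-- one loop iteration: A's climb-and-push equals B's truncate-at-bisect-and-push
lemma step_eq (stack : List Int) (levels : List (Option Int)) (line : String)
    (hs : stack.Pairwise (· < ·)) :
    pyStepA (stack, levels) line = pyStepB (stack, levels) line ∧
    (pyStepA (stack, levels) line).1.Pairwise (· < ·) := by
  unfold pyStepA pyStepB
  by_cases hblank : (PySem.Str.lstrip line).toList = []
  · simp [hblank, hs]
  · simp only [hblank, ite_false]
    set col := PySem.Str.len line - PySem.Str.len (PySem.Str.lstrip line) with hcol
    rw [bsearchLeft_eq_bisectLeft]
    set i := PySem.List.bisectLeft stack col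
    obtain ⟨hile, hlt, hge⟩ := PySem.List.bisectLeft_spec stack col (hs.imp le_of_lt)
    have hmono : ∀ j k (hjk : j < k) (hk : k < stack.length), stack[j]'(by omega) < stack[k] := by
      intro j k hjk hk
      exact List.pairwise_iff_getElem.mp hs j k (by omega) hk hjk
    have hclimb := pyClimb_eq_takeWhile stack col hs
    by_cases hc : stack[i]? = some col
    · -- col is already on the stack: no push after the climb
      obtain ⟨hilt, hceq⟩ := List.getElem?_eq_some_iff.mp hc
      have htake : stack.takeWhile (fun a => a ≤ col) = stack.take (i + 1) := by
        apply takeWhile_eq_take_of _ _ (i + 1) (by omega)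
        · intro j hj hji
          by_cases hji' : j < i
          · have := hlt j hj hji'; simp; omega
          · have : j = i := by omega
            subst this; simp [hceq]
        · intro hm
          have h1 := hmono i (i + 1) (by omega) hm
          simp; omega
      have htake' : stack.take (i + 1) = stack.take i ++ [col] := by
        rw [List.take_add_one, hc]; rfl
      rw [hclimb, htake, htake']
      have hpush : (match (stack.take i ++ [col]).getLast? with
          | none => stack.take i ++ [col] ++ [col]
          | some t => if t < col then stack.take i ++ [col] ++ [col]
                      else stack.take i ++ [col])
          = stack.take i ++ [col] := by
        rw [List.getLast?_concat]; simp
      rw [hpush]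
      have hlen : (stack.take i).length = i := by simp; omega
      refine ⟨Prod.ext rfl ?_, pairwise_take_append stack col i hs (by omega) hlt⟩
      simp [PySem.List.len_eq, hlen]
    · -- col is not on the stack: the climb is followed by a push
      have htake : stack.takeWhile (fun a => a ≤ col) = stack.take i := by
        apply takeWhile_eq_take_of _ _ i hile
        · intro j hj hji
          have := hlt j hj hji; simp; omega
        · intro hm
          have h1 := hge i hm le_rfl
          have h2 : stack[i] ≠ col := by
            intro e; exact hc (List.getElem?_eq_some_iff.mpr ⟨hm, e⟩)
          simp; omega
      rw [hclimb, htake]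
      have hpush : (match (stack.take i).getLast? with
          | none => stack.take i ++ [col]
          | some t => if t < col then stack.take i ++ [col] else stack.take i)
          = stack.take i ++ [col] := by
        cases hi0 : i with
        | zero => simp
        | succ k =>
          have hk : k < stack.length := by omega
          have hlen : (stack.take (k + 1)).length = k + 1 := by simp; omega
          have hlast : (stack.take (k + 1)).getLast? = some stack[k] := by
            rw [List.getLast?_eq_getElem?, hlen]
            simp [hk]
          rw [hlast]
          have := hlt k hk (by omega)
          simp [this]
      rw [hpush]
      have hlen : (stack.take i).length = i := by simp; omega
      refine ⟨Prod.ext rfl ?_, pairwise_take_append stack col i hs hile hlt⟩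
      simp [PySem.List.len_eq, hlen]

lemma fold_eq : ∀ (lines : List String) (stack : List Int) (levels : List (Option Int)),
    stack.Pairwise (· < ·) →
    List.foldl pyStepA (stack, levels) lines = List.foldl pyStepB (stack, levels) lines := by
  intro lines
  induction lines with
  | nil => intro _ _ _; rfl
  | cons line rest ih =>
    intro stack levels hs
    obtain ⟨heq, hp⟩ := step_eq stack levels line hs
    rw [List.foldl_cons, List.foldl_cons, ← heq]
    rcases hst : pyStepA (stack, levels) line with ⟨s, v⟩
    rw [hst] at hp
    exact ih s v hp

-- ===== VERDICT (by name: the statement is the Claim_ definition above) =====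
theorem compute_indent_levels_py_spec : Claim_equal_compute_indent_levels_py := by
  intro raw_lines indent_size _
  unfold Spec_compute_indent_levels_py compute_indent_levels_py compute_indent_levels_py_alt
  rw [fold_eq raw_lines [] [] (by simp)]
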